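-- pv_equiv track=rewrite | github.com/AniruddhaNaidu/Python-Coding | Practice.py | func
-- ===== SOURCE A (Python) =====
-- def func(a,b):
--     c=0
--     if a==0:
--         c+=b//2
--         return 0
--     elif(a%2):
--         return c+func(a//2,2*b)+b
--     else:
--         c+=2
--         return c+func(a//2,2*b)-b
-- ===== SOURCE B (Python) =====
-- def func(a, b):
--     # Closed form: A adds b*2^i for each set bit i of a and (2 - b*2^i) for each
--     # clear bit below the top bit, so the total is b*(2*a - (2**k - 1)) + 2*(k - popcount(a)).
--     if a == 0:
--         return 0
--     k = a.bit_length()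
--     return b * (2 * a - (2 ** k - 1)) + 2 * (k - bin(a).count('1'))
-- ===== Notes on version B (the rewrite author's own statement) =====
-- stated objective: alternative
-- what changed: Replaced the O(log a) recursion by a direct closed-form expression in a.bit_length() and popcount(a), derived from summing A's per-bit contributions.
import Mathlib
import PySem

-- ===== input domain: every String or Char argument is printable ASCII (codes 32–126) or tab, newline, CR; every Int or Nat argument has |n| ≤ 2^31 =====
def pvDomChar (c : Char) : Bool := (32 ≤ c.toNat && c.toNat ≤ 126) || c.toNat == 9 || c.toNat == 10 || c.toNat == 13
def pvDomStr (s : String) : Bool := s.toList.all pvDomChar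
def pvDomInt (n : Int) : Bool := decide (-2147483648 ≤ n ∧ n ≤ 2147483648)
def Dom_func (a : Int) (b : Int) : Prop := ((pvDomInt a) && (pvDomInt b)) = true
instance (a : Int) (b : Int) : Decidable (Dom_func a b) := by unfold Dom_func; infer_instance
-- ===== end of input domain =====

-- B replaces A's self-recursion by a closed-form expression in bit_length and popcount; objective: alternative (different algorithm). Pre_ excludes a < 0, where A raises RecursionError.


-- ===== PORT A =====
-- Literal port of A's recursion; fuel a.toNat + 1 suffices for every a ≥ 0 (for a < 0
-- Python recurses forever, excluded by Pre_func); the fuel-0 value is never reached on Pre_.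
def funcFuel : Nat → Int → Int → Int
  | 0, _, _ => 0
  | n + 1, a, b =>
    if a = 0 then 0
    else if PySem.Int.mod a 2 ≠ 0 then 0 + funcFuel n (PySem.Int.floordiv a 2) (2 * b) + b
    else (0 + 2) + funcFuel n (PySem.Int.floordiv a 2) (2 * b) - b

def func (a : Int) (b : Int) : Int := funcFuel (a.toNat + 1) a b

-- ===== PORT B =====
-- Literal port of Source B's closed form: a.bit_length() → PySem.Int.bitLength,
-- bin(a).count('1') → PySem.Int.bitCount (both Python-exact).
def func_alt (a : Int) (b : Int) : Int :=
  if a = 0 then 0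
  else
    let k := PySem.Int.bitLength a
    b * (2 * a - (2 ^ k - 1)) + 2 * ((k : Int) - (PySem.Int.bitCount a : Int))

-- ===== PRECONDITION & SPEC =====
-- Pre_ excludes exactly a < 0, where Python A raises RecursionError (a//2 never reaches 0).
def Pre_func (a : Int) (b : Int) : Prop := 0 ≤ a
instance (a : Int) (b : Int) : Decidable (Pre_func a b) := by unfold Pre_func; infer_instance
def pvWitness_func : Int × Int := (6, 5)

def Spec_func (a : Int) (b : Int) (out : Int) : Prop := out = func_alt a b
instance (a : Int) (b : Int) (out : Int) : Decidable (Spec_func a b out) := by unfold Spec_func; infer_instance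

-- ===== CLAIM (what is proved, stated in full; the proofs are below) =====
def Claim_equal_func : Prop := ∀ (a : Int) (b : Int), Dom_func a b → Pre_func a b → Spec_func a b (func a b)

-- ===== LEMMAS AND PROOFS =====
-- The closed form also holds uniformly at a = 0 (both sides are 0 there).
theorem func_alt_closed (a b : Int) :
    func_alt a b =
      b * (2 * a - (2 ^ PySem.Int.bitLength a - 1)) +
        2 * ((PySem.Int.bitLength a : Int) - (PySem.Int.bitCount a : Int)) := by
  by_cases h : a = 0
  · simp [func_alt, h, PySem.Int.bitLength_zero, PySem.Int.bitCount_zero]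
  · simp [func_alt, h]

theorem funcFuel_eq (n : Nat) : ∀ (a b : Int), 0 ≤ a → a.toNat < n →
    funcFuel n a b = func_alt a b := by
  induction n with
  | zero => intro a b _ h; omega
  | succ n ih =>
    intro a b ha hn
    by_cases h0 : a = 0
    · simp [funcFuel, func_alt, h0]
    · have hpos : 0 < a := lt_of_le_of_ne ha (Ne.symm h0)
      have hfd : PySem.Int.floordiv a 2 = a / 2 :=
        PySem.Int.floordiv_eq_ediv_of_pos (by omega)
      have hmd : PySem.Int.mod a 2 = a % 2 :=
        PySem.Int.mod_eq_emod_of_pos (by omega)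
      have hle : 0 ≤ a / 2 := by omega
      have hlt : (a / 2).toNat < n := by omega
      have ihh := ih (PySem.Int.floordiv a 2) (2 * b) (by rw [hfd]; exact hle)
        (by rw [hfd]; exact hlt)
      have hbl : PySem.Int.bitLength a = PySem.Int.bitLength (a / 2) + 1 := by
        rw [← hfd]; exact PySem.Int.bitLength_of_pos hpos
      have hbc : PySem.Int.bitCount a = (PySem.Int.mod a 2).toNat + PySem.Int.bitCount (a / 2) := by
        rw [← hfd]; exact PySem.Int.bitCount_of_pos hpos
      have hdiv : 2 * (a / 2) + a % 2 = a := by omega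
      rw [hfd] at ihh
      simp only [funcFuel, if_neg h0, hfd, ihh, func_alt_closed, hbl, hbc, hmd]
      split_ifs with hm
      · have h1 : a % 2 = 1 := by omega
        rw [h1] at hdiv ⊢
        simp only [Int.toNat_one]
        push_cast
        rw [pow_succ]
        set q := a / 2 with hq
        rw [show a = 2 * q + 1 by omega]
        ring
      · have h1 : a % 2 = 0 := by omega
        rw [h1] at hdiv ⊢
        simp only [Int.toNat_zero]
        push_cast
        rw [pow_succ]
        set q := a / 2 with hq
        rw [show a = 2 * q + 0 by omega]
        ring

-- ===== VERDICT (by name: the statement is the Claim_ definition above) =====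
theorem func_spec : Claim_equal_func := by
  intro a b _ ha
  exact funcFuel_eq (a.toNat + 1) a b ha (by omega)
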